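-- pv_equiv track=rewrite | github.com/GH-Jo/coding_practice | Programmers/캐릭터의 좌표.py | solution
-- ===== SOURCE A (Python) =====
-- def solution(keyinput, board):
--     pos = [0, 0]
--     dic = {'up':[0,1], 'down':[0,-1],
--           'left':[-1,0], 'right':[1,0]}
--     xlim, ylim = board[0]//2, board[1]//2
--     for k in keyinput:
--         x, y = pos
--         dx, dy = dic[k]
--         x = max(-xlim, min(x+dx, xlim))
--         y = max(-ylim, min(y+dy, ylim))
--         pos = x, y
--     return pos
--
--     return answer
-- ===== SOURCE B (Python) =====
-- def solution(keyinput, board):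
--     # Per-axis decomposition: fold each axis separately over the key sequence,
--     # clamping that axis at every step (same clamp as the interleaved loop).
--     xlim, ylim = board[0] // 2, board[1] // 2
--     x = 0
--     for k in keyinput:
--         x = max(-xlim, min(x + (-1 if k == 'left' else 1 if k == 'right' else 0), xlim))
--     y = 0
--     for k in keyinput:
--         y = max(-ylim, min(y + (1 if k == 'up' else -1 if k == 'down' else 0), ylim))
--     return (x, y)
-- ===== Notes on version B (the rewrite author's own statement) =====
-- stated objective: alternative
-- what changed: Replaces the single interleaved loop over a direction dictionary by two independent per-axis folds, each clamping only its own coordinate.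
-- outside the precondition, e.g. on solution(['up', 'jump'], [4, 4]): A raises KeyError, B returns (0, 1); on solution(['up'], [4]): A raises IndexError, B raises IndexError
import Mathlib
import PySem

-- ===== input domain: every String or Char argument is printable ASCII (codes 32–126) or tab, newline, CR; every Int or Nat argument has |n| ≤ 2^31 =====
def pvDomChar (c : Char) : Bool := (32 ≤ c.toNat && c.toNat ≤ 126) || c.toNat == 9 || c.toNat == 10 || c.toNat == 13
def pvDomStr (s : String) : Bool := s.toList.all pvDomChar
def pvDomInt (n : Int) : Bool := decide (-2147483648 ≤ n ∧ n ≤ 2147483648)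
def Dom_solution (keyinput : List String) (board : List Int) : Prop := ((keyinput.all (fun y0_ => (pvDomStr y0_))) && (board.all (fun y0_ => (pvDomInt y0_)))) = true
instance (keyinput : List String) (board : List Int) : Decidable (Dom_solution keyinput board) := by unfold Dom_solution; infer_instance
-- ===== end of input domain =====

-- B replaces A's single interleaved loop over a direction dict by two independent
-- per-axis folds over the key list (objective: alternative decomposition, same cost).


-- ===== PORT A =====
def solutionDic : PySem.Dict String (Int × Int) :=
  PySem.Dict.ofList [("up", (0, 1)), ("down", (0, -1)), ("left", (-1, 0)), ("right", (1, 0))]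

def solution (keyinput : List String) (board : List Int) : Int × Int :=
  let xlim : Int := PySem.Int.floordiv ((PySem.List.pyGet? board 0).getD 0) 2
  let ylim : Int := PySem.Int.floordiv ((PySem.List.pyGet? board 1).getD 0) 2
  keyinput.foldl (fun pos k =>
    let d := (solutionDic.get? k).getD (0, 0)   -- dic[k]; Pre_ guarantees the key is present
    (max (-xlim) (min (pos.1 + d.1) xlim), max (-ylim) (min (pos.2 + d.2) ylim)))
    (0, 0)

-- ===== PORT B =====
def solution_alt (keyinput : List String) (board : List Int) : Int × Int :=
  let xlim : Int := PySem.Int.floordiv ((PySem.List.pyGet? board 0).getD 0) 2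
  let ylim : Int := PySem.Int.floordiv ((PySem.List.pyGet? board 1).getD 0) 2
  let x := keyinput.foldl (fun x k =>
    max (-xlim) (min (x + (if k = "left" then -1 else if k = "right" then 1 else 0)) xlim)) 0
  let y := keyinput.foldl (fun y k =>
    max (-ylim) (min (y + (if k = "up" then 1 else if k = "down" then -1 else 0)) ylim)) 0
  (x, y)

-- ===== PRECONDITION & SPEC =====
-- Pre_ excludes exactly the inputs where A raises: boards with fewer than 2 cells
-- (IndexError) and key strings outside the direction dict (KeyError).
def Pre_solution (keyinput : List String) (board : List Int) : Prop :=
  2 ≤ board.length ∧ ∀ k ∈ keyinput, k = "up" ∨ k = "down" ∨ k = "left" ∨ k = "right"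
instance (keyinput : List String) (board : List Int) : Decidable (Pre_solution keyinput board) := by unfold Pre_solution; infer_instance
def pvWitness_solution : List String × List Int := (["up", "left", "down"], [4, 2])

def Spec_solution (keyinput : List String) (board : List Int) (out : Int × Int) : Prop := out = solution_alt keyinput board
instance (keyinput : List String) (board : List Int) (out : Int × Int) : Decidable (Spec_solution keyinput board out) := by unfold Spec_solution; infer_instance

-- ===== CLAIM (what is proved, stated in full; the proofs are below) =====
def Claim_equal_solution : Prop := ∀ (keyinput : List String) (board : List Int), Dom_solution keyinput board → Pre_solution keyinput board → Spec_solution keyinput board (solution keyinput board)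

-- ===== LEMMAS AND PROOFS =====

-- The interleaved fold of A equals the pair of per-axis folds of B, for any start state.
theorem solution_fold_split (xlim ylim : Int) (ks : List String)
    (hk : ∀ k ∈ ks, k = "up" ∨ k = "down" ∨ k = "left" ∨ k = "right") (p : Int × Int) :
    ks.foldl (fun pos k =>
        let d := (solutionDic.get? k).getD (0, 0)
        (max (-xlim) (min (pos.1 + d.1) xlim), max (-ylim) (min (pos.2 + d.2) ylim))) p
    = (ks.foldl (fun x k =>
        max (-xlim) (min (x + (if k = "left" then -1 else if k = "right" then 1 else 0)) xlim)) p.1,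
       ks.foldl (fun y k =>
        max (-ylim) (min (y + (if k = "up" then 1 else if k = "down" then -1 else 0)) ylim)) p.2) := by
  induction ks generalizing p with
  | nil => rfl
  | cons k t ih =>
    have hkk := hk k (List.mem_cons_self ..)
    have ht : ∀ k ∈ t, k = "up" ∨ k = "down" ∨ k = "left" ∨ k = "right" :=
      fun k hm => hk k (List.mem_cons_of_mem _ hm)
    simp only [List.foldl_cons]
    rw [ih ht]
    have hup : (solutionDic.get? "up").getD (0, 0) = ((0 : Int), (1 : Int)) := by decide
    have hdown : (solutionDic.get? "down").getD (0, 0) = ((0 : Int), (-1 : Int)) := by decide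
    have hleft : (solutionDic.get? "left").getD (0, 0) = ((-1 : Int), (0 : Int)) := by decide
    have hright : (solutionDic.get? "right").getD (0, 0) = ((1 : Int), (0 : Int)) := by decide
    rcases hkk with h | h | h | h <;> subst h <;>
      simp [hup, hdown, hleft, hright]

-- ===== VERDICT (by name: the statement is the Claim_ definition above) =====
theorem solution_spec : Claim_equal_solution := by
  intro keyinput board _ hpre
  unfold Spec_solution solution solution_alt
  exact solution_fold_split _ _ keyinput hpre.2 (0, 0)
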